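-- pv_equiv track=rewrite | github.com/AnnaToi01/FastQC_simulator | Misha/fastqc_nucleotide_and_gc_content.py | get_nucleotide_per_position
-- ===== SOURCE A (Python) =====
-- def get_nucleotide_per_position(sequences_list):
--     nucleotide_per_position_dic = {}
--     for sequence in sequences_list:
--         for position_number in range(len(sequence)):
--             if position_number in nucleotide_per_position_dic:
--                 nucleotide_per_position_dic[position_number].append(sequence[position_number])
--             else:
--                 nucleotide_per_position_dic[position_number] = [sequence[position_number]]
--     return nucleotide_per_position_dic
-- ===== SOURCE B (Python) =====
-- def get_nucleotide_per_position(sequences_list):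
--     maxlen = max(map(len, sequences_list), default=0)
--     return {i: [s[i] for s in sequences_list if i < len(s)]
--             for i in range(maxlen)}
-- ===== Notes on version B (the rewrite author's own statement) =====
-- stated objective: idiomatic
-- what changed: Replaces the sequence-major dict-mutation loop by a position-major transpose: compute the maximum length once and build each column with a comprehension over the sequences.
import Mathlib
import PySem

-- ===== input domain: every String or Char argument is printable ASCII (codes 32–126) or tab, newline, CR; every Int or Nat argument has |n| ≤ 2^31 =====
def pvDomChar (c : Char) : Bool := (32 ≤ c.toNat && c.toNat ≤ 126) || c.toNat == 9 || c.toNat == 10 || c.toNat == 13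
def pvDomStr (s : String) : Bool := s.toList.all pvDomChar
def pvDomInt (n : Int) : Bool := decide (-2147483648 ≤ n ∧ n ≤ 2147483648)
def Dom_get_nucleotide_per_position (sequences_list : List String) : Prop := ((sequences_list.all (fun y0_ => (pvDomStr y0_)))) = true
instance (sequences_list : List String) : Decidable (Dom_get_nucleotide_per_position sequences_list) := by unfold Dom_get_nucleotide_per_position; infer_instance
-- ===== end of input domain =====

-- B replaces the sequence-major dict-mutation loop by a position-major transpose
-- (compute the maximum length once, then build each column directly); objective: idiomatic.

-- ===== PORT A =====
def get_nucleotide_per_position (sequences_list : List String) : List (Int × List String) :=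
  (sequences_list.foldl
    (fun dic sequence =>
      (PySem.List.pyRange 0 (PySem.Str.len sequence) 1).foldl
        (fun dic position_number =>
          if dic.contains position_number then
            dic.modify position_number []
              (fun l => l ++ [String.mk [PySem.List.pyGetD sequence.toList position_number ' ']])
          else
            dic.insert position_number
              [String.mk [PySem.List.pyGetD sequence.toList position_number ' ']])
        dic)
    PySem.Dict.empty).items

-- ===== PORT B =====
def get_nucleotide_per_position_alt (sequences_list : List String) : List (Int × List String) :=
  let maxlen : Int := PySem.List.maxD (sequences_list.map PySem.Str.len) id 0
  (PySem.List.pyRange 0 maxlen 1).map (fun i =>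
    (i, (sequences_list.filter (fun s => i < PySem.Str.len s)).map
          (fun s => String.mk [PySem.List.pyGetD s.toList i ' '])))

-- ===== PRECONDITION & SPEC =====
def Spec_get_nucleotide_per_position (sequences_list : List String) (out : List (Int × List String)) : Prop := out = get_nucleotide_per_position_alt sequences_list
instance (sequences_list : List String) (out : List (Int × List String)) : Decidable (Spec_get_nucleotide_per_position sequences_list out) := by unfold Spec_get_nucleotide_per_position; infer_instance

-- ===== CLAIM (what is proved, stated in full; the proofs are below) =====
def Claim_equal_get_nucleotide_per_position : Prop := ∀ (sequences_list : List String), Dom_get_nucleotide_per_position sequences_list → Spec_get_nucleotide_per_position sequences_list (get_nucleotide_per_position sequences_list)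

-- ===== LEMMAS AND PROOFS =====

/-- The uniform "append at key" step A's branches amount to. -/
def pvStep (d : PySem.Dict Int (List String)) (p : Int × String) : PySem.Dict Int (List String) :=
  d.modify p.1 [] (fun l => l ++ [p.2])

/-- The (position, one-char string) pairs one sequence contributes, in order. -/
def pvPairs (s : String) : List (Int × String) :=
  (PySem.List.enumerate s.toList 0).map (fun p => (p.1, String.mk [p.2]))

def pvL (seqs : List String) : List (Int × String) := seqs.flatMap pvPairs

lemma pv_step_eq (d : PySem.Dict Int (List String)) (i : Int) (c : String) :
    (if d.contains i then d.modify i [] (fun l => l ++ [c]) else d.insert i [c])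
      = pvStep d (i, c) := by
  by_cases h : d.contains i
  · simp [h, pvStep]
  · rw [if_neg h]
    have hD := PySem.Dict.getD_of_not_contains d (k := i) ([] : List String) (by simpa using h)
    simp [pvStep, PySem.Dict.modify, hD]

lemma pv_inner {β : Type} (h : β → Int → Char → β) (dflt : Char) :
    ∀ (suf pre : List Char) (init : β),
      (PySem.List.pyRange (pre.length : Int) ((pre.length : Int) + suf.length) 1).foldl
          (fun b i => h b i (PySem.List.pyGetD (pre ++ suf) i dflt)) init
        = (PySem.List.enumerate suf (pre.length : Int)).foldl (fun b p => h b p.1 p.2) init := by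
  intro suf
  induction suf with
  | nil =>
      intro pre init
      rw [PySem.List.pyRange_one_eq_nil (by simp)]
      simp [PySem.List.enumerate]
  | cons c suf ih =>
      intro pre init
      rw [PySem.List.pyRange_one_cons (by simp only [List.length_cons]; push_cast; omega), List.foldl_cons]
      have hget : PySem.List.pyGetD (pre ++ c :: suf) (pre.length : Int) dflt = c := by
        simp [PySem.List.pyGetD, PySem.List.pyGet?, PySem.List.pyIdx?]
      rw [hget]
      have hrest : PySem.List.pyRange ((pre.length : Int) + 1) ((pre.length : Int) + (c :: suf).length) 1
          = PySem.List.pyRange (((pre ++ [c]).length : Int)) (((pre ++ [c]).length : Int) + suf.length) 1 := by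
        congr 1 <;> simp only [List.length_append, List.length_cons, List.length_nil] <;> push_cast <;> omega
      have hlist : pre ++ c :: suf = (pre ++ [c]) ++ suf := by simp
      rw [hrest, hlist, ih (pre ++ [c]) (h init (pre.length : Int) c)]
      rw [PySem.List.enumerate_cons, List.foldl_cons]
      have : ((pre ++ [c]).length : Int) = (pre.length : Int) + 1 := by simp only [List.length_append, List.length_nil, List.length_cons]; push_cast; omega
      rw [this]

lemma pv_seq_fold (s : String) (d : PySem.Dict Int (List String)) :
    (PySem.List.pyRange 0 (PySem.Str.len s) 1).foldl
        (fun dic i =>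
          if dic.contains i then
            dic.modify i [] (fun l => l ++ [String.mk [PySem.List.pyGetD s.toList i ' ']])
          else
            dic.insert i [String.mk [PySem.List.pyGetD s.toList i ' ']])
        d
      = (pvPairs s).foldl pvStep d := by
  have h0 := pv_inner (fun b i c => pvStep b (i, String.mk [c])) ' ' s.toList [] d
  simp only [List.length_nil, Nat.cast_zero, zero_add, List.nil_append] at h0
  calc (PySem.List.pyRange 0 (PySem.Str.len s) 1).foldl
        (fun dic i =>
          if dic.contains i then
            dic.modify i [] (fun l => l ++ [String.mk [PySem.List.pyGetD s.toList i ' ']])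
          else
            dic.insert i [String.mk [PySem.List.pyGetD s.toList i ' ']]) d
      = (PySem.List.pyRange 0 ((s.toList.length : Int)) 1).foldl
          (fun b i => pvStep b (i, String.mk [PySem.List.pyGetD s.toList i ' '])) d := by
        rw [PySem.Str.len_eq]
        congr 1
        funext b i
        exact pv_step_eq b i (String.mk [PySem.List.pyGetD s.toList i ' '])
    _ = (PySem.List.enumerate s.toList 0).foldl (fun b p => pvStep b (p.1, String.mk [p.2])) d := h0
    _ = (pvPairs s).foldl pvStep d := by
        rw [pvPairs, List.foldl_map]

lemma pv_A_fold (seqs : List String) :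
    get_nucleotide_per_position seqs = ((pvL seqs).foldl pvStep PySem.Dict.empty).items := by
  rw [get_nucleotide_per_position]
  congr 1
  have : ∀ (l : List String) (d : PySem.Dict Int (List String)),
      l.foldl (fun dic sequence =>
        (PySem.List.pyRange 0 (PySem.Str.len sequence) 1).foldl
          (fun dic position_number =>
            if dic.contains position_number then
              dic.modify position_number []
                (fun l => l ++ [String.mk [PySem.List.pyGetD sequence.toList position_number ' ']])
            else
              dic.insert position_number
                [String.mk [PySem.List.pyGetD sequence.toList position_number ' ']])
          dic) d
      = (pvL l).foldl pvStep d := by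
    intro l
    induction l with
    | nil => intro d; simp [pvL]
    | cons s rest ih =>
        intro d
        rw [List.foldl_cons, pv_seq_fold, ih]
        simp only [pvL, List.flatMap_cons, List.foldl_append]
  exact this seqs PySem.Dict.empty

lemma pv_if_lt_max (a x : Int) : (if a < x then some x else some a) = some (max a x) := by
  rcases lt_or_ge a x with h | h
  · simp [h, max_eq_right h.le]
  · simp [not_lt.mpr h, max_eq_left h]

lemma pv_max?_cons : ∀ (xs : List Int) (a : Int),
    PySem.List.max? (a :: xs) id = some (xs.foldl max a) := by
  intro xs
  induction xs with
  | nil => intro a; rfl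
  | cons x xs ih =>
      intro a
      have key : PySem.List.max? (a :: x :: xs) id = PySem.List.max? (max a x :: xs) id := by
        show List.foldl _ (if id a < id x then some x else some a) xs
            = List.foldl _ (some (max a x)) xs
        rw [show (if id a < id x then some x else some a) = some (max a x) from by
          simpa using pv_if_lt_max a x]
      rw [key, ih (max a x), List.foldl_cons]

lemma pv_maxD_nonneg (xs : List Int) (h : ∀ x ∈ xs, 0 ≤ x) :
    PySem.List.maxD xs id 0 = xs.foldl max 0 := by
  cases xs with
  | nil => rfl
  | cons x xs =>
      have hx : max 0 x = x := max_eq_right (h x (by simp))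
      rw [List.foldl_cons, hx, PySem.List.maxD, pv_max?_cons xs x, Option.getD_some]

lemma pv_update_range_le (m n : Int) (hnm : n ≤ m) :
    PySem.Set.update (PySem.List.pyRange 0 m 1) (PySem.List.pyRange 0 n 1)
      = PySem.List.pyRange 0 m 1 := by
  rw [PySem.Set.update_eq_append_filter]
  have hfil : List.filter (fun y => !PySem.Set.contains (PySem.List.pyRange 0 m 1) y)
      (PySem.Set.ofList (PySem.List.pyRange 0 n 1)) = [] := by
    rw [List.filter_eq_nil_iff]
    intro y hy
    have hy' : y ∈ PySem.List.pyRange 0 n 1 := (PySem.Set.mem_ofList _ _).1 hy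
    have hb := (PySem.List.mem_pyRange_one).1 hy'
    have hm : y ∈ PySem.List.pyRange 0 m 1 := (PySem.List.mem_pyRange_one).2 (by omega)
    simp [PySem.Set.contains_eq_listContains, hm]
  rw [hfil, List.append_nil]

lemma pv_update_range (m n : Int) (hm : 0 ≤ m) (_hn : 0 ≤ n) :
    PySem.Set.update (PySem.List.pyRange 0 m 1) (PySem.List.pyRange 0 n 1)
      = PySem.List.pyRange 0 (max m n) 1 := by
  by_cases h : n ≤ m
  · rw [pv_update_range_le m n h, max_eq_left h]
  · have h' : m ≤ n := le_of_not_ge h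
    rw [PySem.List.pyRange_one_append 0 m n hm h', PySem.Set.update_append,
      pv_update_range_le m m le_rfl]
    rw [PySem.Set.update_eq_append_of_disjoint _ _ (PySem.List.nodup_pyRange_one m n)]
    · rw [← PySem.List.pyRange_one_append 0 m n hm h', max_eq_right h']
    · intro x hx hx'
      have h1 := (PySem.List.mem_pyRange_one).1 hx
      have h2 := (PySem.List.mem_pyRange_one).1 hx'
      omega

lemma pv_update_flat (seqs : List String) :
    ∀ m : Int, 0 ≤ m →
      PySem.Set.update (PySem.List.pyRange 0 m 1)
          (seqs.flatMap (fun s => PySem.List.pyRange 0 (PySem.Str.len s) 1))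
        = PySem.List.pyRange 0 (seqs.foldl (fun a s => max a (PySem.Str.len s)) m) 1 := by
  induction seqs with
  | nil => intro m hm; simp [PySem.Set.update_nil]
  | cons s rest ih =>
      intro m hm
      have hlen : (0:Int) ≤ PySem.Str.len s := by rw [PySem.Str.len_eq]; positivity
      rw [List.flatMap_cons, PySem.Set.update_append, pv_update_range m _ hm hlen,
        ih _ (le_max_of_le_left hm), List.foldl_cons]

lemma pv_map_fst_L (seqs : List String) :
    (pvL seqs).map Prod.fst = seqs.flatMap (fun s => PySem.List.pyRange 0 (PySem.Str.len s) 1) := by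
  rw [pvL, List.map_flatMap]
  congr 1
  funext s
  rw [pvPairs, List.map_map]
  have h1 : (Prod.fst ∘ fun p : Int × Char => (p.1, String.mk [p.2])) = (fun p : Int × Char => p.1) := rfl
  rw [h1, PySem.List.map_fst_enumerate, PySem.Str.len_eq]
  simp

/-- items of a nodup-keyed dict are its keys paired with their `getD` values. -/
lemma pv_items_eq (d : PySem.Dict Int (List String)) (h : d.keys.Nodup) :
    d.items = d.keys.map (fun k => (k, d.getD k [])) := by
  have hk : d.keys = d.items.map Prod.fst := rfl
  rw [hk, List.map_map]
  symm
  calc d.items.map ((fun k => (k, d.getD k [])) ∘ Prod.fst)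
      = d.items.map id := by
        apply List.map_congr_left
        intro p hp
        have hg := PySem.Dict.getD_of_mem_items d (k := p.1) (v := p.2) (by simpa using hp) h []
        simp [Function.comp, hg]
    _ = d.items := List.map_id d.items

lemma pv_fst_enumerate_le {α : Type} (xs : List α) (t : Int) (p : Int × α)
    (hp : p ∈ PySem.List.enumerate xs t) : t ≤ p.1 := by
  have hm : p.1 ∈ (PySem.List.enumerate xs t).map (fun x => x.1) := List.mem_map_of_mem hp
  rw [PySem.List.map_fst_enumerate] at hm
  exact ((PySem.List.mem_pyRange_one).1 hm).1

lemma pv_enum_filter (i : Int) :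
    ∀ (xs : List Char) (t : Int),
      (PySem.List.enumerate xs t).filter (fun p => p.1 == i)
        = if t ≤ i ∧ i < t + xs.length then [(i, PySem.List.pyGetD xs (i - t) ' ')] else [] := by
  intro xs
  induction xs with
  | nil =>
      intro t
      rw [show PySem.List.enumerate ([] : List Char) t = [] from rfl]
      simp only [List.filter_nil, List.length_nil]
      rw [if_neg (by push_cast; omega)]
  | cons c xs ih =>
      intro t
      rw [PySem.List.enumerate_cons, List.filter_cons]
      by_cases ht : t = i
      · subst ht
        have hnil : (PySem.List.enumerate xs (t + 1)).filter (fun p => p.1 == t) = [] := by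
          rw [List.filter_eq_nil_iff]
          intro p hp
          have := pv_fst_enumerate_le xs (t + 1) p hp
          simp only [beq_iff_eq]; omega
        have hget : PySem.List.pyGetD (c :: xs) (t - t) ' ' = c := by
          simp [PySem.List.pyGetD, PySem.List.pyGet?, PySem.List.pyIdx?]
        simp only [beq_self_eq_true, if_true, hnil, hget]
        rw [if_pos (by simp only [List.length_cons]; push_cast; omega)]
      · have hne : ((t, c).1 == i) = false := by simp [ht]
        rw [hne, if_neg (by simp), ih (t + 1)]
        by_cases hc : t + 1 ≤ i ∧ i < t + 1 + (xs.length : Int)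
        · rw [if_pos hc, if_pos (by simp only [List.length_cons]; omega)]
          have hsh : PySem.List.pyGetD xs (i - (t + 1)) ' ' = PySem.List.pyGetD (c :: xs) (i - t) ' ' := by
            simp only [PySem.List.pyGetD, PySem.List.pyGet?, PySem.List.pyIdx?, List.length_cons]
            rw [if_pos (by omega), if_pos (by omega), if_pos (by omega),
              if_pos (by omega)]
            have hidx : (i - t).toNat = (i - (t + 1)).toNat + 1 := by omega
            simp [hidx]
          rw [hsh]
        · rw [if_neg hc, if_neg (by simp only [List.length_cons]; push_cast at hc ⊢; omega)]

lemma pv_col (i : Int) (hi : 0 ≤ i) :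
    ∀ seqs : List String,
      ((pvL seqs).filter (fun p => p.1 == i)).map Prod.snd
        = (seqs.filter (fun s => i < PySem.Str.len s)).map
            (fun s => String.mk [PySem.List.pyGetD s.toList i ' ']) := by
  intro seqs
  induction seqs with
  | nil => simp [pvL]
  | cons s rest ih =>
      rw [pvL, List.flatMap_cons, List.filter_append, List.map_append, ← pvL, ih,
        List.filter_cons]
      have hone : ((pvPairs s).filter (fun p => p.1 == i)).map Prod.snd
          = if i < PySem.Str.len s then [String.mk [PySem.List.pyGetD s.toList i ' ']] else [] := by
        rw [pvPairs, List.filter_map]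
        have hcomp : ((fun p : Int × String => p.1 == i) ∘ fun p : Int × Char => (p.1, String.mk [p.2]))
            = fun p : Int × Char => p.1 == i := rfl
        rw [hcomp, pv_enum_filter i s.toList 0]
        by_cases hlt : i < PySem.Str.len s
        · rw [if_pos (by rw [PySem.Str.len_eq] at hlt; constructor <;> omega), if_pos hlt]
          simp
        · rw [if_neg (by rw [PySem.Str.len_eq] at hlt; omega), if_neg hlt]
          simp
      by_cases hlt : i < PySem.Str.len s
      · rw [if_pos (by simpa using hlt)]
        rw [hone, if_pos hlt]
        rfl
      · rw [if_neg (by simpa using hlt)]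
        rw [hone, if_neg hlt]
        simp

lemma pv_keys_nodup (seqs : List String) :
    ((pvL seqs).foldl pvStep PySem.Dict.empty).keys.Nodup := by
  have := PySem.Dict.nodup_keys_foldl_modify_key (pvL seqs) Prod.fst ([] : List String)
      (fun _ p => fun l => l ++ [p.2]) PySem.Dict.empty (by simp)
  simpa [pvStep] using this

lemma pv_keys_eq (seqs : List String) :
    ((pvL seqs).foldl pvStep PySem.Dict.empty).keys
      = PySem.List.pyRange 0 (PySem.List.maxD (seqs.map PySem.Str.len) id 0) 1 := by
  have hk := PySem.Dict.keys_foldl_modify_key (pvL seqs) Prod.fst ([] : List String)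
      (fun _ p => fun l => l ++ [p.2]) PySem.Dict.empty
  have hk' : ((pvL seqs).foldl pvStep PySem.Dict.empty).keys
      = PySem.Set.update (PySem.List.pyRange 0 0 1) ((pvL seqs).map Prod.fst) := by
    simpa [pvStep, PySem.List.pyRange_one_eq_nil (le_refl (0:Int))] using hk
  rw [hk', pv_map_fst_L, pv_update_flat seqs 0 le_rfl]
  congr 1
  rw [pv_maxD_nonneg]
  · rw [List.foldl_map]
  · intro x hx
    obtain ⟨s, _, rfl⟩ := List.mem_map.1 hx
    rw [PySem.Str.len_eq]; positivity

lemma pv_getD_eq (seqs : List String) (i : Int) :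
    ((pvL seqs).foldl pvStep PySem.Dict.empty).getD i []
      = ((pvL seqs).filter (fun p => p.1 == i)).map Prod.snd := by
  have := PySem.Dict.getD_foldl_modify_append (pvL seqs) (PySem.Dict.empty (κ := Int) (ν := List String)) i
  simpa [pvStep] using this

-- ===== VERDICT (by name: the statement is the Claim_ definition above) =====
theorem get_nucleotide_per_position_spec : Claim_equal_get_nucleotide_per_position := by
  intro seqs _
  unfold Spec_get_nucleotide_per_position get_nucleotide_per_position_alt
  rw [pv_A_fold, pv_items_eq _ (pv_keys_nodup seqs), pv_keys_eq]
  apply List.map_congr_left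
  intro i hi
  have hi0 : 0 ≤ i := ((PySem.List.mem_pyRange_one).1 hi).1
  rw [pv_getD_eq, pv_col i hi0 seqs]
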